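-- pv_equiv track=rewrite | github.com/981377660LMT/algorithm-study | atcoder/abc359-F - Tree Degree Optimization.py | treeDegreeOptimization
-- ===== SOURCE A (Python) =====
-- from heapq import heapify, heappop, heappush
-- from typing import List
--
-- def treeDegreeOptimization(nums: List[int]) -> int:
--     n = len(nums)
--     deg = [1] * n
--     pq = [(3 * v, i) for i, v in enumerate(nums)]  # (增长代价, 点编号)
--     heapify(pq)
--     for _ in range(n - 2):
--         _, id = heappop(pq)
--         deg[id] += 1
--         d = deg[id]
--         delta = ((d + 1) * (d + 1) - d * d) * nums[id]
--         heappush(pq, (delta, id))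
--     return sum(d * d * v for d, v in zip(deg, nums))
-- ===== SOURCE B (Python) =====
-- from typing import List
--
--
-- def treeDegreeOptimization(nums: List[int]) -> int:
--     n = len(nums)
--     m = n - 2
--     s = sum(nums)
--     if m <= 0:
--         return s
--     mn = min(nums)
--     if mn <= 0:
--         # every extra degree goes to the cheapest node: concave (non-positive)
--         # marginal costs make concentrating on the minimum optimal
--         return s + mn * (m * m + 2 * m)
--     # all values positive: binary-search the threshold marginal cost T.
--     # a node of value v has k increments of cost <= T where k = max(0, (T//v - 1)//2)
--     def cnt(T: int) -> int:
--         c = 0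
--         for v in nums:
--             k = (T // v - 1) // 2
--             if k > 0:
--                 c += k
--         return c
--     lo, hi = 0, (2 * m + 1) * mn
--     while hi - lo > 1:
--         mid = (lo + hi) // 2
--         if cnt(mid) >= m:
--             hi = mid
--         else:
--             lo = mid
--     T = hi
--     taken = 0
--     extra = 0
--     for v in nums:
--         k = (lo // v - 1) // 2  # increments strictly below T  (lo == T-1 cost-wise: cost <= T-1)
--         if k < 0:
--             k = 0
--         taken += k
--         extra += v * (k * k + 2 * k)
--     return s + extra + (m - taken) * T
-- ===== Notes on version B (the rewrite author's own statement) =====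
-- stated objective: alternative
-- what changed: Replaces the heap-greedy simulation (pop the cheapest marginal degree n-2 times) by a direct computation: for n<=2 the plain sum, for a non-positive minimum a closed form giving all extra degrees to the cheapest node, and otherwise a binary search for the marginal-cost threshold T, charging all increments below T plus enough increments exactly at T.
import Mathlib
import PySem

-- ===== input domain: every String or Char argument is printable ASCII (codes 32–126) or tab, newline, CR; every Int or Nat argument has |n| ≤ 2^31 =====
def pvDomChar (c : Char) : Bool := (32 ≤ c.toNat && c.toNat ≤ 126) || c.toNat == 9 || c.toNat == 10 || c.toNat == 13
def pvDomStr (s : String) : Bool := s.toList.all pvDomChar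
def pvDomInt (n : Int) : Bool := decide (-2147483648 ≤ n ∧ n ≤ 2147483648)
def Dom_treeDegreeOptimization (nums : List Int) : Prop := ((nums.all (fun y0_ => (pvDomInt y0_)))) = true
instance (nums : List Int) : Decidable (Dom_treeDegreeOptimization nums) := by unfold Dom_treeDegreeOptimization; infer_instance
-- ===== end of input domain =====

-- B replaces A's heap-greedy (pop the cheapest marginal degree n-2 times) by a
-- closed form for a non-positive minimum and a binary search on the marginal-cost
-- threshold otherwise (an alternative algorithm of comparable cost).

-- ===== PORT A =====
-- lexicographic strict comparison on (cost, id) pairs: Python's tuple '<'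
def pvLt (x y : Int × Int) : Bool := x.1 < y.1 || (x.1 == y.1 && x.2 < y.2)

-- heapq is modelled by min-extraction on the list of pairs: exact here because the
-- heap always holds pairs with pairwise-distinct second components, so heappop's
-- result (the unique smallest pair) and the remaining multiset are determined.
def pvPopMin : List (Int × Int) → Option ((Int × Int) × List (Int × Int))
  | [] => none
  | x :: xs =>
    match pvPopMin xs with
    | none => some (x, [])
    | some (m, r) => if pvLt m x then some (m, x :: r) else some (x, xs)

-- the 'for _ in range(n - 2)' loop of A
def pvLoopA (nums : List Int) : Nat → List Int → List (Int × Int) → List Int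
  | 0, deg, _ => deg
  | t + 1, deg, pq =>
    match pvPopMin pq with
    | none => deg  -- unreachable: the heap is never empty when the loop runs
    | some ((_, id), rest) =>
      let d0 := PySem.List.pyGetD deg id 0
      let deg' := PySem.List.pySetD deg id (d0 + 1)
      let d := d0 + 1
      let delta := ((d + 1) * (d + 1) - d * d) * PySem.List.pyGetD nums id 0
      pvLoopA nums t deg' (rest ++ [(delta, id)])

def treeDegreeOptimization (nums : List Int) : Int :=
  let n := nums.length
  let deg := List.replicate n (1 : Int)
  let pq := (PySem.List.enumerate nums 0).map (fun p => (3 * p.2, p.1))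
  let deg' := pvLoopA nums (n - 2) deg pq
  ((deg'.zip nums).map (fun p => p.1 * p.1 * p.2)).sum

-- ===== PORT B =====
def pvCnt (nums : List Int) (T : Int) : Int :=
  nums.foldl (fun c v =>
    let k := PySem.Int.floordiv (PySem.Int.floordiv T v - 1) 2
    if k > 0 then c + k else c) 0

def pvBsearch (nums : List Int) (m : Int) (lo hi : Int) : Int × Int :=
  if _h : hi - lo > 1 then
    let mid := PySem.Int.floordiv (lo + hi) 2
    if pvCnt nums mid ≥ m then pvBsearch nums m lo mid else pvBsearch nums m mid hi
  else (lo, hi)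
termination_by (hi - lo).toNat
decreasing_by
  · simp only [PySem.Int.floordiv] at *
    have h2 : Int.fdiv (lo + hi) 2 = (lo + hi) / 2 := by
      rw [Int.fdiv_eq_ediv]; norm_num
    omega
  · simp only [PySem.Int.floordiv] at *
    have h2 : Int.fdiv (lo + hi) 2 = (lo + hi) / 2 := by
      rw [Int.fdiv_eq_ediv]; norm_num
    omega

def treeDegreeOptimization_alt (nums : List Int) : Int :=
  let n := nums.length
  let m : Int := (n : Int) - 2
  let s := nums.sum
  if m ≤ 0 then s
  else
    match PySem.List.min? nums (fun x => x) with
    | none => s  -- unreachable: n ≥ 3 here, min(nums) cannot raise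
    | some mn =>
      if mn ≤ 0 then s + mn * (m * m + 2 * m)
      else
        let p := pvBsearch nums m 0 ((2 * m + 1) * mn)
        let lo := p.1
        let T := p.2
        let te := nums.foldl (fun (q : Int × Int) v =>
          let k0 := PySem.Int.floordiv (PySem.Int.floordiv lo v - 1) 2
          let k := if k0 < 0 then 0 else k0
          (q.1 + k, q.2 + v * (k * k + 2 * k))) (0, 0)
        s + te.2 + (m - te.1) * T

-- ===== PRECONDITION & SPEC =====
def Spec_treeDegreeOptimization (nums : List Int) (out : Int) : Prop := out = treeDegreeOptimization_alt nums
instance (nums : List Int) (out : Int) : Decidable (Spec_treeDegreeOptimization nums out) := by unfold Spec_treeDegreeOptimization; infer_instance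

-- ===== CLAIM (what is proved, stated in full; the proofs are below) =====
def Claim_equal_treeDegreeOptimization : Prop := ∀ (nums : List Int), Dom_treeDegreeOptimization nums → Spec_treeDegreeOptimization nums (treeDegreeOptimization nums)

-- ===== LEMMAS AND PROOFS =====

-- ---- proof-side abbreviations ----

-- value of node i
def pvV (nums : List Int) (i : Nat) : Int := nums.getD i 0
-- the final sum A computes from a degree list
def pvRes (deg nums : List Int) : Int := ((deg.zip nums).map (fun p => p.1 * p.1 * p.2)).sum
-- non-strict lexicographic comparison
def pvPLe (x y : Int × Int) : Bool := !pvLt y x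
-- the first l marginal-cost pairs of node i (extra degree j costs (2j+3)·v)
def pvStream (nums : List Int) (i l : Nat) : List (Int × Int) :=
  (List.range l).map (fun (j : Nat) => ((2 * (j : Int) + 3) * pvV nums i, (i : Int)))
-- all candidate increments, m per node
def pvCand (nums : List Int) (m : Nat) : List (Int × Int) :=
  (List.range nums.length).flatMap (fun i => pvStream nums i m)
def pvSorted (nums : List Int) (m : Nat) : List (Int × Int) := (pvCand nums m).mergeSort pvPLe
-- current cheapest pair of every node, given extra degrees k
def pvFronts (nums : List Int) (k : Nat → Nat) : List (Int × Int) :=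
  (List.range nums.length).map (fun i => ((2 * (k i : Int) + 3) * pvV nums i, (i : Int)))
-- all increments already taken, given extra degrees k
def pvPref (nums : List Int) (k : Nat → Nat) : Multiset (Int × Int) :=
  ∑ i ∈ Finset.range nums.length, (pvStream nums i (k i) : Multiset (Int × Int))
-- pq entries of all nodes other than i0, for the non-positive-minimum case
def pvOthers (nums : List Int) (i0 : Nat) : List (Int × Int) :=
  ((List.range nums.length).filter (fun j => j != i0)).map (fun j => (3 * pvV nums j, (j : Int)))
-- total cost of a multiset of pairs
def pvCost (M : Multiset (Int × Int)) : Int := (M.map Prod.fst).sum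
-- the B-side per-node count expression
def pvK (S v : Int) : Int := PySem.Int.floordiv (PySem.Int.floordiv S v - 1) 2

-- ---- order and popMin lemmas ----

lemma pvLt_iff {x y : Int × Int} : pvLt x y = true ↔ (x.1 < y.1 ∨ (x.1 = y.1 ∧ x.2 < y.2)) := by
  rcases x with ⟨a, b⟩; rcases y with ⟨c, d⟩; simp [pvLt]

lemma pvLt_false_iff {x y : Int × Int} : pvLt x y = false ↔ ¬(x.1 < y.1 ∨ (x.1 = y.1 ∧ x.2 < y.2)) := by
  rw [← Bool.not_eq_true, pvLt_iff]

lemma pvLt_irrefl (x : Int × Int) : pvLt x x = false := by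
  rw [pvLt_false_iff]; omega

lemma pvLt_asymm {x y : Int × Int} (h : pvLt x y = true) : pvLt y x = false := by
  rw [pvLt_iff] at h; rw [pvLt_false_iff]; omega

lemma pvLt_eq_of_false {x y : Int × Int} (h1 : pvLt x y = false) (h2 : pvLt y x = false) : x = y := by
  rw [pvLt_false_iff] at h1 h2
  rcases x with ⟨a, b⟩; rcases y with ⟨c, d⟩
  simp only [Prod.mk.injEq]
  constructor <;> omega

lemma pvLt_total {x y : Int × Int} (h : x ≠ y) : pvLt x y = true ∨ pvLt y x = true := by
  rcases hxy : pvLt x y with _ | _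
  · rcases hyx : pvLt y x with _ | _
    · exact absurd (pvLt_eq_of_false hxy hyx) h
    · exact Or.inr rfl
  · exact Or.inl rfl

lemma pvPLe_trans : ∀ (a b c : Int × Int), pvPLe a b = true → pvPLe b c = true → pvPLe a c = true := by
  rintro a b c h1 h2
  simp only [pvPLe, Bool.not_eq_true'] at *
  rw [pvLt_false_iff] at *
  omega

lemma pvPLe_total : ∀ (a b : Int × Int), (pvPLe a b || pvPLe b a) = true := by
  rintro a b
  simp only [pvPLe, Bool.or_eq_true, Bool.not_eq_true']
  rcases h : pvLt b a
  · left; rfl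
  · right; exact pvLt_asymm h

lemma pvPLe_fst {x y : Int × Int} (h : pvPLe x y = true) : x.1 ≤ y.1 := by
  simp only [pvPLe, Bool.not_eq_true'] at h
  rw [pvLt_false_iff] at h; omega

lemma pvPLe_refl (x : Int × Int) : pvPLe x x = true := by
  simp [pvPLe, pvLt_irrefl]

lemma pvPopMin_eq_none {pq : List (Int × Int)} : pvPopMin pq = none ↔ pq = [] := by
  cases pq with
  | nil => simp [pvPopMin]
  | cons x xs =>
    simp only [pvPopMin]
    cases h : pvPopMin xs with
    | none => simp
    | some r => rcases r with ⟨e, rest⟩; by_cases hl : pvLt e x <;> simp [hl]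

lemma pvPopMin_spec {pq : List (Int × Int)} {e : Int × Int} {rest : List (Int × Int)}
    (h : pvPopMin pq = some (e, rest)) :
    (e :: rest).Perm pq ∧ ∀ y ∈ pq, pvLt y e = false := by
  induction pq generalizing e rest with
  | nil => simp [pvPopMin] at h
  | cons x xs ih =>
    simp only [pvPopMin] at h
    cases hx : pvPopMin xs with
    | none =>
      have hxs : xs = [] := pvPopMin_eq_none.mp hx
      subst hxs
      simp only [hx, Option.some.injEq, Prod.mk.injEq] at h
      obtain ⟨rfl, rfl⟩ := h
      refine ⟨by simp, ?_⟩
      intro y hy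
      simp at hy; subst hy
      exact pvLt_irrefl _
    | some r =>
      rcases r with ⟨e', rest'⟩
      obtain ⟨hperm, hmin⟩ := ih hx
      simp only [hx] at h
      by_cases hl : pvLt e' x = true
      · simp only [hl, if_pos, Option.some.injEq, Prod.mk.injEq] at h
        obtain ⟨rfl, rfl⟩ := h
        constructor
        · exact (List.Perm.swap x e' rest').trans (hperm.cons x)
        · intro y hy
          rcases List.mem_cons.mp hy with rfl | hy
          · exact pvLt_asymm hl
          · exact hmin y hy
      · rw [if_neg hl] at h
        simp only [Option.some.injEq, Prod.mk.injEq] at h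
        obtain ⟨rfl, rfl⟩ := h
        refine ⟨List.Perm.refl _, ?_⟩
        intro y hy
        rcases List.mem_cons.mp hy with rfl | hy
        · exact pvLt_irrefl _
        · have h1 := hmin y hy
          have hl' : pvLt e' x = false := Bool.eq_false_iff.mpr hl
          rw [pvLt_false_iff] at *
          omega

lemma pvPopMin_of_min {pq L : List (Int × Int)} {e0 : Int × Int}
    (hperm : pq.Perm L) (he : e0 ∈ L) (hmin : ∀ y ∈ L, y ≠ e0 → pvLt e0 y = true) :
    ∃ r, pvPopMin pq = some (e0, r) ∧ (e0 :: r).Perm L := by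
  have hne : pq ≠ [] := by
    intro hn; subst hn
    have : L = [] := (List.Perm.nil_eq hperm).symm
    simp [this] at he
  cases hpop : pvPopMin pq with
  | none => exact absurd (pvPopMin_eq_none.mp hpop) hne
  | some r =>
    rcases r with ⟨e, rest⟩
    obtain ⟨hp, hm⟩ := pvPopMin_spec hpop
    have hepq : e ∈ pq := hp.mem_iff.mp (by simp)
    have heL : e ∈ L := hperm.mem_iff.mp hepq
    have he0pq : e0 ∈ pq := hperm.mem_iff.mpr he
    by_cases heq : e = e0
    · subst heq
      exact ⟨rest, rfl, hp.trans hperm⟩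
    · have h1 := hmin e heL heq
      have h2 := hm e0 he0pq
      rw [h2] at h1
      · exact absurd h1 (by simp)

-- ---- generic list/sum helpers ----

lemma pvMapRangeSet {β : Type} (f : Nat → β) (n i : Nat) (hi : i < n) (x : β) :
    ((List.range n).map f).set i x = (List.range n).map (fun j => if j = i then x else f j) := by
  apply List.ext_getElem
  · simp
  · intro j h1 h2
    simp only [List.getElem_set, List.getElem_map, List.getElem_range]
    simp at h1
    by_cases hj : j = i
    · simp [hj]
    · rw [if_neg hj, if_neg (fun h : i = j => hj h.symm)]

lemma pvGetDMapRange (f : Nat → Int) (n i : Nat) (hi : i < n) :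
    ((List.range n).map f).getD i 0 = f i := by
  rw [List.getD_eq_getElem?_getD]
  simp [List.getElem?_map, List.getElem?_range, hi]

lemma pvListSum (nums : List Int) (g : Int → Int) :
    (nums.map g).sum = ∑ i ∈ Finset.range nums.length, g (pvV nums i) := by
  induction nums with
  | nil => simp
  | cons x xs ih =>
    simp only [List.map_cons, List.sum_cons, List.length_cons]
    rw [ih, Finset.sum_range_succ']
    simp only [pvV, List.getD_cons_succ, List.getD_cons_zero]
    ring

lemma pvSumV (nums : List Int) : ∑ i ∈ Finset.range nums.length, pvV nums i = nums.sum := by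
  have := pvListSum nums id
  simpa using this.symm

lemma pvRes_map_range (nums : List Int) (f : Nat → Int) :
    pvRes ((List.range nums.length).map f) nums
      = ∑ i ∈ Finset.range nums.length, f i * f i * pvV nums i := by
  induction nums generalizing f with
  | nil => simp [pvRes]
  | cons x xs ih =>
    simp only [List.length_cons]
    rw [List.range_succ_eq_map]
    simp only [List.map_cons, List.map_map]
    simp only [pvRes, List.zip_cons_cons, List.map_cons, List.sum_cons]
    have := ih (f := f ∘ Nat.succ)
    simp only [pvRes] at this
    rw [this, Finset.sum_range_succ']
    simp only [pvV, List.getD_cons_succ, List.getD_cons_zero, Function.comp_apply,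
      Nat.succ_eq_add_one]
    ring

-- ---- candidate-multiset counting lemmas ----

lemma pvV_mem {nums : List Int} {i : Nat} (hi : i < nums.length) : pvV nums i ∈ nums := by
  have : nums.getD i 0 = nums[i] := List.getD_eq_getElem nums 0 hi
  rw [pvV, this]; exact List.getElem_mem hi

lemma pvMem_stream {nums : List Int} {i l : Nat} {e : Int × Int} :
    e ∈ pvStream nums i l ↔ ∃ j < l, e = ((2 * (j : Int) + 3) * pvV nums i, (i : Int)) := by
  simp [pvStream, List.mem_map, List.mem_range]; aesop

lemma pvStream_succ (nums : List Int) (i l : Nat) :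
    pvStream nums i (l + 1) = pvStream nums i l ++ [((2 * (l : Int) + 3) * pvV nums i, (i : Int))] := by
  simp [pvStream, List.range_succ]

lemma pvCount_stream_self {nums : List Int} {i : Nat} (hv : 1 ≤ pvV nums i) (j l : Nat) :
    Multiset.count ((2 * (j : Int) + 3) * pvV nums i, (i : Int)) (pvStream nums i l : Multiset (Int × Int))
      = if j < l then 1 else 0 := by
  induction l with
  | zero => simp [pvStream]
  | succ l ih =>
    rw [pvStream_succ, ← Multiset.coe_add, Multiset.count_add, ih]
    have hx : Multiset.count ((2 * (j : Int) + 3) * pvV nums i, (i : Int))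
        (([((2 * (l : Int) + 3) * pvV nums i, (i : Int))] : List (Int × Int)) : Multiset (Int × Int))
          = if l = j then 1 else 0 := by
      by_cases hlj : l = j
      · subst hlj; simp
      · have hne : (((2 * (l : Int) + 3) * pvV nums i, (i : Int)) : Int × Int)
            ≠ ((2 * (j : Int) + 3) * pvV nums i, (i : Int)) := by
          intro hc
          simp only [Prod.mk.injEq] at hc
          have := mul_right_cancel₀ (show pvV nums i ≠ 0 by omega) hc.1
          omega
        simp only [Multiset.coe_singleton, Multiset.count_singleton]
        rw [if_neg (fun h : ((2 * (j : Int) + 3) * pvV nums i, (i : Int))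
              = ((2 * (l : Int) + 3) * pvV nums i, (i : Int)) => hne h.symm), if_neg hlj]
    rw [hx]
    split_ifs <;> omega

lemma pvCount_stream_ne {nums : List Int} {i l : Nat} {a b : Int} (hb : b ≠ (i : Int)) :
    Multiset.count ((a, b)) (pvStream nums i l : Multiset (Int × Int)) = 0 := by
  rw [Multiset.count_eq_zero]
  intro hmem
  rw [Multiset.mem_coe, pvMem_stream] at hmem
  obtain ⟨j, _, hj⟩ := hmem
  simp only [Prod.mk.injEq] at hj
  exact hb hj.2

lemma pvFinsetSumList {β : Type} [AddCommMonoid β] (n : Nat) (g : Nat → β) :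
    ((List.range n).map g).sum = ∑ i ∈ Finset.range n, g i := by
  induction n with
  | zero => simp
  | succ n ih => rw [List.range_succ, Finset.sum_range_succ, List.map_append, List.sum_append, ih]; simp

lemma pvCount_cand {nums : List Int} {m : Nat} (hpos : ∀ x ∈ nums, 1 ≤ x)
    {i j : Nat} (hi : i < nums.length) :
    Multiset.count (((2 * (j : Int) + 3) * pvV nums i, (i : Int))) (pvCand nums m : Multiset (Int × Int))
      = if j < m then 1 else 0 := by
  have hflat : (pvCand nums m : Multiset (Int × Int))
      = ∑ i' ∈ Finset.range nums.length, (pvStream nums i' m : Multiset (Int × Int)) := by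
    rw [pvCand, ← pvFinsetSumList]
    induction (List.range nums.length) with
    | nil => simp
    | cons x xs ih =>
      simp only [List.flatMap_cons, List.map_cons, List.sum_cons, ← ih, Multiset.coe_add]
  rw [hflat, Multiset.count_sum']
  rw [Finset.sum_eq_single_of_mem i (Finset.mem_range.mpr hi)]
  · exact pvCount_stream_self (hpos _ (pvV_mem hi)) j m
  · intro b _ hbi
    exact pvCount_stream_ne (fun hc => hbi (by exact_mod_cast hc.symm))

lemma pvCount_pref {nums : List Int} {k : Nat → Nat} (hpos : ∀ x ∈ nums, 1 ≤ x)
    {i j : Nat} (hi : i < nums.length) :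
    Multiset.count (((2 * (j : Int) + 3) * pvV nums i, (i : Int))) (pvPref nums k)
      = if j < k i then 1 else 0 := by
  rw [pvPref, Multiset.count_sum']
  rw [Finset.sum_eq_single_of_mem i (Finset.mem_range.mpr hi)]
  · exact pvCount_stream_self (hpos _ (pvV_mem hi)) j (k i)
  · intro b _ hbi
    exact pvCount_stream_ne (fun hc => hbi (by exact_mod_cast hc.symm))

lemma pvCost_add (M N : Multiset (Int × Int)) : pvCost (M + N) = pvCost M + pvCost N := by
  simp [pvCost]

lemma pvCost_sum (s : Finset Nat) (f : Nat → Multiset (Int × Int)) :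
    pvCost (∑ i ∈ s, f i) = ∑ i ∈ s, pvCost (f i) := by
  classical
  induction s using Finset.induction with
  | empty => simp [pvCost]
  | insert a s ha ih => rw [Finset.sum_insert ha, Finset.sum_insert ha, pvCost_add, ih]

lemma pvCost_coe (xs : List (Int × Int)) : pvCost (xs : Multiset (Int × Int)) = (xs.map Prod.fst).sum := by
  simp [pvCost]

lemma pvCost_stream (nums : List Int) (i l : Nat) :
    pvCost (pvStream nums i l : Multiset (Int × Int)) = ((l : Int) * (l : Int) + 2 * l) * pvV nums i := by
  induction l with
  | zero => simp [pvStream, pvCost]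
  | succ l ih =>
    rw [pvStream_succ, ← Multiset.coe_add, pvCost_add, ih, pvCost_coe]
    simp only [List.map_cons, List.map_nil, List.sum_cons, List.sum_nil]
    push_cast
    ring

-- ---- the sorted candidate list ----

lemma pvSorted_perm (nums : List Int) (m : Nat) : (pvSorted nums m).Perm (pvCand nums m) :=
  List.mergeSort_perm _ _

lemma pvSorted_pairwise (nums : List Int) (m : Nat) :
    (pvSorted nums m).Pairwise (fun a b => pvPLe a b = true) :=
  List.pairwise_mergeSort pvPLe_trans pvPLe_total _

lemma pvLength_cand (nums : List Int) (m : Nat) : (pvCand nums m).length = nums.length * m := by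
  rw [pvCand, List.length_flatMap]
  have : (List.map (fun i => (pvStream nums i m).length) (List.range nums.length))
      = List.map (fun _ => m) (List.range nums.length) := by
    apply List.map_congr_left
    intro i _
    simp [pvStream]
  rw [this, List.map_const', List.sum_replicate]
  simp [Nat.mul_comm]

lemma pvCand_split (nums : List Int) (m c : Nat) (k : Nat → Nat)
    (h : ((pvSorted nums m).take c : Multiset (Int × Int)) = pvPref nums k) :
    (pvCand nums m : Multiset (Int × Int)) = pvPref nums k + ((pvSorted nums m).drop c : Multiset (Int × Int)) := by
  have h1 : ((pvSorted nums m).take c ++ (pvSorted nums m).drop c : Multiset (Int × Int))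
      = (pvSorted nums m : Multiset (Int × Int)) := by
    rw [List.take_append_drop]
  have h2 : ((pvSorted nums m) : Multiset (Int × Int)) = (pvCand nums m : Multiset (Int × Int)) :=
    Multiset.coe_eq_coe.mpr (pvSorted_perm nums m)
  rw [← h2, ← h1, ← Multiset.coe_add, h]

-- ---- the main A-side induction, positive case ----

lemma pvLoopA_step (nums : List Int) (t : Nat) (deg : List Int) (pq rest : List (Int × Int))
    (e : Int × Int) (h : pvPopMin pq = some (e, rest)) :
    pvLoopA nums (t + 1) deg pq
      = pvLoopA nums t (PySem.List.pySetD deg e.2 (PySem.List.pyGetD deg e.2 0 + 1))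
          (rest ++ [(((PySem.List.pyGetD deg e.2 0 + 1 + 1) * (PySem.List.pyGetD deg e.2 0 + 1 + 1)
              - (PySem.List.pyGetD deg e.2 0 + 1) * (PySem.List.pyGetD deg e.2 0 + 1))
            * PySem.List.pyGetD nums e.2 0, e.2)]) := by
  rcases e with ⟨a, b⟩
  simp [pvLoopA, h]

lemma pvLoopA_pos (nums : List Int) (hpos : ∀ x ∈ nums, 1 ≤ x) (m : Nat)
    (hn : 3 ≤ nums.length) (hm : m = nums.length - 2) :
    ∀ (t : Nat) (k : Nat → Nat) (c : Nat) (pq : List (Int × Int)),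
      c + t = m →
      (∑ i ∈ Finset.range nums.length, k i) = c →
      (pq : Multiset (Int × Int)) = (pvFronts nums k : Multiset (Int × Int)) →
      ((pvSorted nums m).take c : Multiset (Int × Int)) = pvPref nums k →
      pvRes (pvLoopA nums t ((List.range nums.length).map (fun i => 1 + (k i : Int))) pq) nums
        = nums.sum + pvCost (((pvSorted nums m).take m : List (Int × Int)) : Multiset (Int × Int)) := by
  intro t
  induction t with
  | zero =>
    intro k c pq hct hsum hpq htake
    have hcm : c = m := by omega
    subst hcm
    rw [pvLoopA]
    rw [htake, pvRes_map_range, pvPref, pvCost_sum, ← pvSumV nums]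
    rw [← Finset.sum_add_distrib]
    apply Finset.sum_congr rfl
    intro i _
    rw [pvCost_stream]
    push_cast
    ring
  | succ t ih =>
    intro k c pq hct hsum hpq htake
    have hc : c < m := by omega
    have hvpos : ∀ i, i < nums.length → 1 ≤ pvV nums i := fun i hi => hpos _ (pvV_mem hi)
    have hki : ∀ i, i < nums.length → k i ≤ c := by
      intro i hi
      calc k i ≤ ∑ i' ∈ Finset.range nums.length, k i' :=
            Finset.single_le_sum (fun _ _ => Nat.zero_le _) (Finset.mem_range.mpr hi)
        _ = c := hsum
    have hlen : (pvSorted nums m).length = nums.length * m := by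
      rw [pvSorted, List.length_mergeSort, pvLength_cand]
    have hcm : c < (pvSorted nums m).length := by
      rw [hlen]
      have : m ≤ nums.length * m := Nat.le_mul_of_pos_left m (by omega)
      omega
    set S := pvSorted nums m with hS
    set estar := S[c]'hcm with hestar
    have hdropc : S.drop c = estar :: S.drop (c + 1) := List.drop_eq_getElem_cons hcm
    have hCeq := pvCand_split nums m c k htake
    -- every current front lies in the not-yet-taken region
    have hfront_mem : ∀ i, i < nums.length →
        ((2 * (k i : Int) + 3) * pvV nums i, (i : Int)) ∈ S.drop c := by
      intro i hi
      have hkic : k i ≤ c := hki i hi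
      have h1 : Multiset.count ((2 * (k i : Int) + 3) * pvV nums i, (i : Int))
          (pvCand nums m : Multiset (Int × Int)) = 1 := by
        rw [pvCount_cand hpos hi, if_pos (by omega : k i < m)]
      have h2 : Multiset.count ((2 * (k i : Int) + 3) * pvV nums i, (i : Int))
          (pvPref nums k) = 0 := by
        rw [pvCount_pref hpos hi, if_neg (by omega)]
      have h3 := congrArg (Multiset.count ((2 * (k i : Int) + 3) * pvV nums i, (i : Int))) hCeq
      rw [Multiset.count_add, h1, h2, Nat.zero_add] at h3
      exact Multiset.mem_coe.mp (Multiset.count_pos.mp (by rw [← h3]; exact Nat.one_pos))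
    -- estar is minimal among the not-yet-taken region
    have hminS : ∀ y ∈ S.drop c, pvPLe estar y = true := by
      have hpw : (S.drop c).Pairwise (fun a b => pvPLe a b = true) :=
        (pvSorted_pairwise nums m).sublist (List.drop_sublist c S)
      intro y hy
      rw [hdropc] at hy hpw
      rcases List.mem_cons.mp hy with rfl | hy
      · exact pvPLe_refl _
      · exact (List.pairwise_cons.mp hpw).1 y hy
    -- identify estar as the front of some node i
    have hestar_mem : estar ∈ S.drop c := by rw [hdropc]; exact List.mem_cons_self
    have hestar_cand : estar ∈ pvCand nums m := by
      have h3 := congrArg (Multiset.count estar) hCeq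
      rw [Multiset.count_add] at h3
      have h4 : 0 < Multiset.count estar ((S.drop c : List (Int × Int)) : Multiset (Int × Int)) :=
        Multiset.count_pos.mpr (Multiset.mem_coe.mpr hestar_mem)
      have : 0 < Multiset.count estar (pvCand nums m : Multiset (Int × Int)) := by
        rw [h3]
        exact Nat.lt_of_lt_of_le h4 (Nat.le_add_left _ _)
      exact Multiset.mem_coe.mp (Multiset.count_pos.mp this)
    obtain ⟨i, hi, j, hj, hej⟩ : ∃ i, i < nums.length ∧ ∃ j, j < m ∧
        estar = ((2 * (j : Int) + 3) * pvV nums i, (i : Int)) := by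
      rw [pvCand, List.mem_flatMap] at hestar_cand
      obtain ⟨i, hi, hmem⟩ := hestar_cand
      rw [pvMem_stream] at hmem
      obtain ⟨j, hj, hejj⟩ := hmem
      exact ⟨i, List.mem_range.mp hi, j, hj, hejj⟩
    have hjk : j = k i := by
      by_contra hne
      rcases Nat.lt_or_ge j (k i) with hlt | hge
      · -- already taken: contradiction with estar in the drop region
        have h1 : Multiset.count estar (pvCand nums m : Multiset (Int × Int)) = 1 := by
          rw [hej, pvCount_cand hpos hi, if_pos hj]
        have h2 : Multiset.count estar (pvPref nums k) = 1 := by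
          rw [hej, pvCount_pref hpos hi, if_pos hlt]
        have h3 := congrArg (Multiset.count estar) hCeq
        rw [Multiset.count_add, h1, h2] at h3
        have h4 : 0 < Multiset.count estar ((S.drop c : List (Int × Int)) : Multiset (Int × Int)) :=
          Multiset.count_pos.mpr (Multiset.mem_coe.mpr hestar_mem)
        have h5 : (1 : Nat) + 0 = 1 + Multiset.count estar ((S.drop c : List (Int × Int)) : Multiset (Int × Int)) := by
          rw [Nat.add_zero]; exact h3
        have h6 := Nat.add_left_cancel h5
        rw [← h6] at h4
        exact absurd h4 (lt_irrefl 0)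
      · have hgt : k i < j := by omega
        have hfm := hfront_mem i hi
        have hple := hminS _ hfm
        have hlt2 : pvLt ((2 * (k i : Int) + 3) * pvV nums i, (i : Int)) estar = true := by
          rw [hej, pvLt_iff]
          left
          have hv := hvpos i hi
          have : (2 * (k i : Int) + 3) < 2 * (j : Int) + 3 := by omega
          nlinarith
        rw [pvPLe] at hple
        rw [hlt2] at hple
        simp at hple
    subst hjk
    -- pop estar from the queue
    have hpqperm : pq.Perm (pvFronts nums k) := Multiset.coe_eq_coe.mp hpq
    have hefronts : estar ∈ pvFronts nums k := by
      rw [pvFronts, List.mem_map]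
      exact ⟨i, List.mem_range.mpr hi, hej.symm⟩
    have hminF : ∀ y ∈ pvFronts nums k, y ≠ estar → pvLt estar y = true := by
      intro y hy hne
      rw [pvFronts, List.mem_map] at hy
      obtain ⟨i', hi', hy'⟩ := hy
      have hi'n : i' < nums.length := List.mem_range.mp hi'
      have hymem : y ∈ S.drop c := by rw [← hy']; exact hfront_mem i' hi'n
      have hple := hminS y hymem
      rcases pvLt_total (x := estar) (y := y) (fun h => hne h.symm) with h | h
      · exact h
      · rw [pvPLe, h] at hple; simp at hple
    obtain ⟨rest, hpop, hpr⟩ := pvPopMin_of_min hpqperm hefronts hminF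
    rw [pvLoopA_step nums t _ pq rest estar hpop]
    -- the popped id and arithmetic
    have hsnd : estar.2 = (i : Int) := by rw [hej]
    have hdeg0 : PySem.List.pyGetD ((List.range nums.length).map (fun i => 1 + (k i : Int))) estar.2 0
        = 1 + (k i : Int) := by
      rw [hsnd, PySem.List.pyGetD_natCast, pvGetDMapRange _ _ _ hi]
    set k' : Nat → Nat := Function.update k i (k i + 1) with hk'
    have hk'i : k' i = k i + 1 := by rw [hk']; simp
    have hk'ne : ∀ j', j' ≠ i → k' j' = k j' := by
      intro j' hne; rw [hk']; exact Function.update_of_ne hne _ _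
    -- new degree list
    have hdeg' : PySem.List.pySetD ((List.range nums.length).map (fun i => 1 + (k i : Int))) estar.2
        (PySem.List.pyGetD ((List.range nums.length).map (fun i => 1 + (k i : Int))) estar.2 0 + 1)
        = (List.range nums.length).map (fun i => 1 + (k' i : Int)) := by
      rw [hdeg0, hsnd, PySem.List.pySetD_natCast, pvMapRangeSet _ _ _ hi]
      apply List.map_congr_left
      intro j' _
      by_cases hji : j' = i
      · subst hji; rw [if_pos rfl, hk'i]; push_cast; ring
      · rw [if_neg hji, hk'ne j' hji]
    -- the new queue is the new fronts
    have hnewfront : (((PySem.List.pyGetD ((List.range nums.length).map (fun i => 1 + (k i : Int))) estar.2 0 + 1 + 1)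
          * (PySem.List.pyGetD ((List.range nums.length).map (fun i => 1 + (k i : Int))) estar.2 0 + 1 + 1)
          - (PySem.List.pyGetD ((List.range nums.length).map (fun i => 1 + (k i : Int))) estar.2 0 + 1)
          * (PySem.List.pyGetD ((List.range nums.length).map (fun i => 1 + (k i : Int))) estar.2 0 + 1))
        * PySem.List.pyGetD nums estar.2 0, estar.2)
        = ((2 * (k' i : Int) + 3) * pvV nums i, (i : Int)) := by
      rw [hdeg0, hsnd, PySem.List.pyGetD_natCast]
      have : nums.getD (i : Nat) 0 = pvV nums i := rfl
      rw [this, hk'i]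
      rw [Prod.mk.injEq]
      exact ⟨by push_cast; ring, rfl⟩
    have hfrontsk' : pvFronts nums k' = (pvFronts nums k).set i ((2 * (k' i : Int) + 3) * pvV nums i, (i : Int)) := by
      simp only [pvFronts]
      rw [pvMapRangeSet _ _ _ hi]
      apply List.map_congr_left
      intro j' _
      by_cases hji : j' = i
      · subst hji; rw [if_pos rfl]
      · rw [if_neg hji, hk'ne j' hji]
    have hlenF : i < (pvFronts nums k).length := by
      rw [pvFronts, List.length_map, List.length_range]; exact hi
    have hFi : (pvFronts nums k)[i]'hlenF = estar := by
      simp only [pvFronts, List.getElem_map, List.getElem_range]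
      exact hej.symm
    have hsplitF : pvFronts nums k = (pvFronts nums k).take i ++ estar :: (pvFronts nums k).drop (i + 1) := by
      conv_lhs => rw [← List.take_append_drop i (pvFronts nums k)]
      rw [List.drop_eq_getElem_cons hlenF, hFi]
    have hsetF : (pvFronts nums k).set i ((2 * (k' i : Int) + 3) * pvV nums i, (i : Int))
        = (pvFronts nums k).take i ++ ((2 * (k' i : Int) + 3) * pvV nums i, (i : Int)) :: (pvFronts nums k).drop (i + 1) := by
      rw [List.set_eq_take_append_cons_drop, if_pos hlenF]
    have hrest : rest.Perm ((pvFronts nums k).take i ++ (pvFronts nums k).drop (i + 1)) := by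
      have h1 : (estar :: rest).Perm (pvFronts nums k) := hpr
      rw [hsplitF] at h1
      exact (h1.trans List.perm_middle).cons_inv
    have hnewpq : (rest ++ [((2 * (k' i : Int) + 3) * pvV nums i, (i : Int))]).Perm (pvFronts nums k') := by
      rw [hfrontsk', hsetF]
      refine (List.perm_append_singleton _ _).trans ?_
      refine (hrest.cons _).trans ?_
      exact List.perm_middle.symm
    have htakesucc : S.take (c + 1) = S.take c ++ [estar] := by
      rw [List.take_succ, List.getElem?_eq_getElem hcm]
      rfl
    have hpref' : pvPref nums k' = pvPref nums k + {estar} := by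
      simp only [pvPref]
      rw [← Finset.add_sum_erase _ (fun i' => (pvStream nums i' (k' i') : Multiset (Int × Int))) (Finset.mem_range.mpr hi),
          ← Finset.add_sum_erase _ (fun i' => (pvStream nums i' (k i') : Multiset (Int × Int))) (Finset.mem_range.mpr hi)]
      have h1 : (pvStream nums i (k' i) : Multiset (Int × Int))
          = (pvStream nums i (k i) : Multiset (Int × Int)) + {estar} := by
        rw [hk'i, pvStream_succ, ← Multiset.coe_add, hej, Multiset.coe_singleton]
      have h2 : ∀ x ∈ (Finset.range nums.length).erase i,
          (pvStream nums x (k' x) : Multiset (Int × Int)) = (pvStream nums x (k x) : Multiset (Int × Int)) := by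
        intro x hx
        rw [hk'ne x (Finset.ne_of_mem_erase hx)]
      rw [Finset.sum_congr rfl h2, h1]
      abel
    have htake' : ((S.take (c + 1) : List (Int × Int)) : Multiset (Int × Int)) = pvPref nums k' := by
      rw [htakesucc, ← Multiset.coe_add, htake, hpref', Multiset.coe_singleton]
    have hsum' : (∑ i' ∈ Finset.range nums.length, k' i') = c + 1 := by
      have h3 : ∑ i' ∈ Finset.range nums.length, k' i'
          = k' i + ∑ x ∈ (Finset.range nums.length).erase i, k' x :=
        (Finset.add_sum_erase _ k' (Finset.mem_range.mpr hi)).symm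
      have h4 : ∑ x ∈ (Finset.range nums.length).erase i, k' x
          = ∑ x ∈ (Finset.range nums.length).erase i, k x :=
        Finset.sum_congr rfl (fun x hx => hk'ne x (Finset.ne_of_mem_erase hx))
      have h5 : k i + ∑ x ∈ (Finset.range nums.length).erase i, k x
          = ∑ i' ∈ Finset.range nums.length, k i' :=
        Finset.add_sum_erase _ k (Finset.mem_range.mpr hi)
      rw [h3, h4, hk'i]
      omega
    rw [hdeg', hnewfront]
    exact ih k' (c + 1) _ (by omega) hsum' (Multiset.coe_eq_coe.mpr hnewpq) htake'

-- ---- the non-positive-minimum case ----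

lemma pvFirstMin (nums : List Int) (mn : Int) (hmem : mn ∈ nums) :
    ∃ i0, i0 < nums.length ∧ pvV nums i0 = mn ∧ ∀ j, j < i0 → pvV nums j ≠ mn := by
  induction nums with
  | nil => simp at hmem
  | cons x xs ih =>
    by_cases hx : x = mn
    · exact ⟨0, by simp, by simp [pvV, hx], fun j hj => absurd hj (Nat.not_lt_zero j)⟩
    · have hmem' : mn ∈ xs := by
        rcases List.mem_cons.mp hmem with h | h
        · exact absurd h.symm hx
        · exact h
      obtain ⟨i0, h1, h2, h3⟩ := ih hmem'
      refine ⟨i0 + 1, by simpa using h1, by simpa [pvV] using h2, ?_⟩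
      intro j hj
      cases j with
      | zero => simpa [pvV] using hx
      | succ j' =>
        have : j' < i0 := by omega
        simpa [pvV] using h3 j' this

lemma pvRes_replicate (nums : List Int) : pvRes (List.replicate nums.length (1 : Int)) nums = nums.sum := by
  induction nums with
  | nil => simp [pvRes]
  | cons x xs ih =>
    simp only [List.length_cons, List.replicate_succ, pvRes, List.zip_cons_cons,
      List.map_cons, List.sum_cons] at *
    rw [ih]
    ring

lemma pvRes_neg (nums : List Int) (i0 : Nat) (hi0 : i0 < nums.length) (D : Int) :
    pvRes ((List.range nums.length).map (fun j => if j = i0 then D else 1)) nums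
      = nums.sum + (D * D - 1) * pvV nums i0 := by
  rw [pvRes_map_range]
  have hcongr : ∀ j ∈ Finset.range nums.length,
      (if j = i0 then D else 1) * (if j = i0 then D else 1) * pvV nums j
        = pvV nums j + (if j = i0 then (D * D - 1) * pvV nums i0 else 0) := by
    intro j _
    split_ifs with hj
    · subst hj; ring
    · ring
  rw [Finset.sum_congr rfl hcongr, Finset.sum_add_distrib, pvSumV]
  congr 1
  rw [Finset.sum_ite_eq' (Finset.range nums.length) i0 (fun _ => (D * D - 1) * pvV nums i0)]
  rw [if_pos (Finset.mem_range.mpr hi0)]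

lemma pvInitPq (nums : List Int) :
    (PySem.List.enumerate nums 0).map (fun p => (3 * p.2, p.1))
      = (List.range nums.length).map (fun i => (3 * pvV nums i, (i : Int))) := by
  apply List.ext_getElem?
  intro j
  by_cases hj : j < nums.length
  · simp only [List.getElem?_map, PySem.List.getElem?_enumerate, List.getElem?_range hj,
      List.getElem?_eq_getElem hj, Option.map_some]
    have : pvV nums j = nums[j] := List.getD_eq_getElem nums 0 hj
    rw [this]
    norm_num
  · have h1 : nums[j]? = none := List.getElem?_eq_none (by omega)
    have h2 : (List.range nums.length)[j]? = none := List.getElem?_eq_none (by simpa using hj)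
    simp [h1, h2]

lemma pvLoopA_neg (nums : List Int) (mn : Int) (i0 : Nat)
    (hmn : mn ≤ 0) (hmin : ∀ x ∈ nums, mn ≤ x)
    (hi0 : i0 < nums.length) (hv0 : pvV nums i0 = mn)
    (hfirst : ∀ j, j < i0 → pvV nums j ≠ mn) :
    ∀ (t c : Nat) (pq : List (Int × Int)),
      pq.Perm (((2 * (c : Int) + 3) * mn, (i0 : Int)) :: pvOthers nums i0) →
      pvLoopA nums t ((List.range nums.length).map (fun j => if j = i0 then 1 + (c : Int) else 1)) pq
        = (List.range nums.length).map (fun j => if j = i0 then 1 + ((c + t : Nat) : Int) else 1) := by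
  intro t
  induction t with
  | zero =>
    intro c pq _
    rw [pvLoopA]
    simp
  | succ t ih =>
    intro c pq hpq
    have hminpq : ∀ y ∈ (((2 * (c : Int) + 3) * mn, (i0 : Int)) :: pvOthers nums i0),
        y ≠ ((2 * (c : Int) + 3) * mn, (i0 : Int)) →
          pvLt ((2 * (c : Int) + 3) * mn, (i0 : Int)) y = true := by
      intro y hy hne
      rcases List.mem_cons.mp hy with rfl | hy
      · exact absurd rfl hne
      · rw [pvOthers, List.mem_map] at hy
        obtain ⟨j, hj, rfl⟩ := hy
        rw [List.mem_filter, List.mem_range] at hj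
        have hjn : j < nums.length := hj.1
        have hji0 : j ≠ i0 := by simpa using hj.2
        have hvj : mn ≤ pvV nums j := hmin _ (pvV_mem hjn)
        rw [pvLt_iff]
        dsimp only
        rcases lt_or_eq_of_le hvj with hlt | heq
        · left
          nlinarith [Int.natCast_nonneg c]
        · have hji : i0 < j := by
            rcases Nat.lt_or_ge j i0 with h | h
            · exact absurd heq.symm (hfirst j h)
            · omega
          rcases eq_or_lt_of_le (show (2 * (c : Int) + 3) * mn ≤ 3 * pvV nums j by
              nlinarith [Int.natCast_nonneg c]) with he | hl
          · right
            refine ⟨he, ?_⟩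
            exact_mod_cast hji
          · left; exact hl
    obtain ⟨rest, hpop, hpr⟩ := pvPopMin_of_min hpq List.mem_cons_self hminpq
    rw [pvLoopA_step nums t _ pq rest _ hpop]
    have hget : PySem.List.pyGetD
        ((List.range nums.length).map (fun j => if j = i0 then 1 + (c : Int) else 1))
        (((2 * (c : Int) + 3) * mn, (i0 : Int)) : Int × Int).2 0 = 1 + (c : Int) := by
      show PySem.List.pyGetD _ ((i0 : Nat) : Int) 0 = _
      rw [PySem.List.pyGetD_natCast, pvGetDMapRange _ _ _ hi0, if_pos rfl]
    have hdeg' : PySem.List.pySetD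
        ((List.range nums.length).map (fun j => if j = i0 then 1 + (c : Int) else 1))
        (((2 * (c : Int) + 3) * mn, (i0 : Int)) : Int × Int).2
        (PySem.List.pyGetD ((List.range nums.length).map (fun j => if j = i0 then 1 + (c : Int) else 1))
          (((2 * (c : Int) + 3) * mn, (i0 : Int)) : Int × Int).2 0 + 1)
        = (List.range nums.length).map (fun j => if j = i0 then 1 + ((c + 1 : Nat) : Int) else 1) := by
      rw [hget]
      show PySem.List.pySetD _ ((i0 : Nat) : Int) _ = _
      rw [PySem.List.pySetD_natCast, pvMapRangeSet _ _ _ hi0]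
      apply List.map_congr_left
      intro j' _
      by_cases hji : j' = i0
      · subst hji; rw [if_pos rfl, if_pos rfl]; push_cast; ring
      · rw [if_neg hji, if_neg hji, if_neg hji]
    have hnum : PySem.List.pyGetD nums (((2 * (c : Int) + 3) * mn, (i0 : Int)) : Int × Int).2 0 = mn := by
      show PySem.List.pyGetD nums ((i0 : Nat) : Int) 0 = mn
      rw [PySem.List.pyGetD_natCast]
      exact hv0
    have hnewf : ((PySem.List.pyGetD ((List.range nums.length).map (fun j => if j = i0 then 1 + (c : Int) else 1)) (((2 * (c : Int) + 3) * mn, (i0 : Int)) : Int × Int).2 0 + 1 + 1)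
          * (PySem.List.pyGetD ((List.range nums.length).map (fun j => if j = i0 then 1 + (c : Int) else 1)) (((2 * (c : Int) + 3) * mn, (i0 : Int)) : Int × Int).2 0 + 1 + 1)
          - (PySem.List.pyGetD ((List.range nums.length).map (fun j => if j = i0 then 1 + (c : Int) else 1)) (((2 * (c : Int) + 3) * mn, (i0 : Int)) : Int × Int).2 0 + 1)
          * (PySem.List.pyGetD ((List.range nums.length).map (fun j => if j = i0 then 1 + (c : Int) else 1)) (((2 * (c : Int) + 3) * mn, (i0 : Int)) : Int × Int).2 0 + 1))
        * PySem.List.pyGetD nums (((2 * (c : Int) + 3) * mn, (i0 : Int)) : Int × Int).2 0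
        = (2 * ((c + 1 : Nat) : Int) + 3) * mn := by
      rw [hget, hnum]
      push_cast
      ring
    have hrest : rest.Perm (pvOthers nums i0) := by
      have h1 := hpr
      exact h1.cons_inv
    have hnewpq : (rest ++ [((2 * ((c + 1 : Nat) : Int) + 3) * mn, (((2 * (c : Int) + 3) * mn, (i0 : Int)) : Int × Int).2)]).Perm
        (((2 * ((c + 1 : Nat) : Int) + 3) * mn, (i0 : Int)) :: pvOthers nums i0) := by
      refine (List.perm_append_singleton _ _).trans ?_
      exact hrest.cons _
    rw [hdeg']
    rw [show (((2 * (c : Int) + 3) * mn, (i0 : Int)) : Int × Int).2 = (i0 : Int) from rfl] at hnewf ⊢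
    rw [hnewf]
    have := ih (c + 1) _ hnewpq
    rw [show c + (t + 1) = (c + 1) + t by omega]
    exact this

-- ---- B-side arithmetic ----

lemma pvFloordiv_pos (a b : Int) (hb : 0 < b) : PySem.Int.floordiv a b = a / b := by
  show Int.fdiv a b = a / b
  rw [Int.fdiv_eq_ediv, if_pos (Or.inl hb.le), sub_zero]

lemma pvK_iff (S v : Int) (hv : 1 ≤ v) (j : Int) : ((2 * j + 3) * v ≤ S) ↔ j < pvK S v := by
  have h2 : (0 : Int) < 2 := by norm_num
  have hv0 : (0 : Int) < v := by omega
  rw [pvK, pvFloordiv_pos _ _ hv0, pvFloordiv_pos _ _ h2]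
  constructor
  · intro h
    have ha : 2 * j + 3 ≤ S / v := (Int.le_ediv_iff_mul_le hv0).mpr h
    have hb' : j + 1 ≤ (S / v - 1) / 2 := (Int.le_ediv_iff_mul_le h2).mpr (by omega)
    omega
  · intro h
    have ha : j + 1 ≤ (S / v - 1) / 2 := by omega
    have hb' : (j + 1) * 2 ≤ S / v - 1 := (Int.le_ediv_iff_mul_le h2).mp ha
    exact (Int.le_ediv_iff_mul_le hv0).mp (by omega)

lemma pvCountP_range (K : Int) (l : Nat) :
    ((List.countP (fun (j : Nat) => decide ((j : Int) < K)) (List.range l) : Nat) : Int)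
      = min (l : Int) (max 0 K) := by
  induction l with
  | zero =>
    simp only [List.range_zero, List.countP_nil, Nat.cast_zero]
    omega
  | succ l ih =>
    rw [List.range_succ, List.countP_append]
    simp only [List.countP_cons, List.countP_nil]
    by_cases h : (l : Int) < K
    · simp only [decide_eq_true h]
      push_cast
      omega
    · simp only [decide_eq_false h]
      push_cast
      omega

lemma pvCountP_stream (nums : List Int) (i l : Nat) (hv : 1 ≤ pvV nums i) (S : Int) :
    ((List.countP (fun e => decide (e.1 ≤ S)) (pvStream nums i l) : Nat) : Int)
      = min (l : Int) (max 0 (pvK S (pvV nums i))) := by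
  rw [pvStream, List.countP_map]
  have hcongr : ((fun e : Int × Int => decide (e.1 ≤ S))
        ∘ (fun j : Nat => ((2 * (j : Int) + 3) * pvV nums i, (i : Int))))
      = fun (j : Nat) => decide ((j : Int) < pvK S (pvV nums i)) := by
    funext j
    simp only [Function.comp_apply]
    rw [decide_eq_decide]
    exact pvK_iff S (pvV nums i) hv (j : Int)
  rw [hcongr, pvCountP_range]

lemma pvCountP_cand (nums : List Int) (m : Nat) (hpos : ∀ x ∈ nums, 1 ≤ x) (S : Int) :
    ((List.countP (fun e => decide (e.1 ≤ S)) (pvCand nums m) : Nat) : Int)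
      = ∑ i ∈ Finset.range nums.length, min (m : Int) (max 0 (pvK S (pvV nums i))) := by
  rw [pvCand, List.countP_flatMap, pvFinsetSumList]
  push_cast
  apply Finset.sum_congr rfl
  intro i hi
  simp only [Function.comp_apply]
  exact pvCountP_stream nums i m (hpos _ (pvV_mem (Finset.mem_range.mp hi))) S

lemma pvCnt_eq (nums : List Int) (S : Int) :
    pvCnt nums S = ∑ i ∈ Finset.range nums.length, max 0 (pvK S (pvV nums i)) := by
  rw [pvCnt]
  have hbody : (fun (c v : Int) =>
      let k := PySem.Int.floordiv (PySem.Int.floordiv S v - 1) 2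
      if k > 0 then c + k else c) = fun c v => c + max 0 (pvK S v) := by
    funext c v
    simp only [pvK]
    split_ifs with h
    · omega
    · omega
  rw [hbody, PySem.List.foldl_add, pvListSum nums (fun v => max 0 (pvK S v)), zero_add]

lemma pvTe_eq (nums : List Int) (lo : Int) :
    nums.foldl (fun (q : Int × Int) v =>
      let k0 := PySem.Int.floordiv (PySem.Int.floordiv lo v - 1) 2
      let k := if k0 < 0 then 0 else k0
      (q.1 + k, q.2 + v * (k * k + 2 * k))) (0, 0)
    = (∑ i ∈ Finset.range nums.length, max 0 (pvK lo (pvV nums i)),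
       ∑ i ∈ Finset.range nums.length, pvV nums i
         * (max 0 (pvK lo (pvV nums i)) * max 0 (pvK lo (pvV nums i))
            + 2 * max 0 (pvK lo (pvV nums i)))) := by
  have hbody : (fun (q : Int × Int) v =>
      let k0 := PySem.Int.floordiv (PySem.Int.floordiv lo v - 1) 2
      let k := if k0 < 0 then 0 else k0
      (q.1 + k, q.2 + v * (k * k + 2 * k)))
      = fun (q : Int × Int) v =>
        ((fun (a v : Int) => a + max 0 (pvK lo v)) q.1 v,
         (fun (a v : Int) => a + v * (max 0 (pvK lo v) * max 0 (pvK lo v) + 2 * max 0 (pvK lo v))) q.2 v) := by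
    funext q v
    dsimp only
    have hk : (if PySem.Int.floordiv (PySem.Int.floordiv lo v - 1) 2 < 0 then 0
        else PySem.Int.floordiv (PySem.Int.floordiv lo v - 1) 2) = max 0 (pvK lo v) := by
      rw [pvK]; split_ifs <;> omega
    rw [hk]
  rw [hbody, PySem.List.foldl_prod_mk (f := fun (a v : Int) => a + max 0 (pvK lo v))
    (g := fun (a v : Int) => a + v * (max 0 (pvK lo v) * max 0 (pvK lo v) + 2 * max 0 (pvK lo v))),
    PySem.List.foldl_add, PySem.List.foldl_add,
    pvListSum nums (fun v => max 0 (pvK lo v)),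
    pvListSum nums (fun v => v * (max 0 (pvK lo v) * max 0 (pvK lo v) + 2 * max 0 (pvK lo v))),
    zero_add, zero_add]

-- ---- the sorted cost list and the threshold sum ----

lemma pvCosts_pairwise (nums : List Int) (m : Nat) :
    ((pvSorted nums m).map Prod.fst).Pairwise (· ≤ ·) :=
  List.Pairwise.map _ (fun _ _ h => pvPLe_fst h) (pvSorted_pairwise nums m)

lemma pvCountP_costs (nums : List Int) (m : Nat) (S : Int) :
    List.countP (fun x => decide (x ≤ S)) ((pvSorted nums m).map Prod.fst)
      = List.countP (fun e => decide (e.1 ≤ S)) (pvCand nums m) := by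
  rw [List.countP_map]
  exact (pvSorted_perm nums m).countP_eq _

lemma pvGauss (vv : Int) (l : Nat) :
    ((List.range l).map (fun (j : Nat) => (2 * (j : Int) + 3) * vv)).sum
      = ((l : Int) * (l : Int) + 2 * (l : Int)) * vv := by
  induction l with
  | zero => simp
  | succ l ih =>
    rw [List.range_succ, List.map_append, List.sum_append, ih]
    simp only [List.map_cons, List.map_nil, List.sum_cons, List.sum_nil]
    push_cast
    ring

lemma pvFilterRangeLt (kk l : Nat) :
    (List.range l).filter (fun (j : Nat) => decide (j < kk)) = List.range (min kk l) := by
  induction l with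
  | zero => simp
  | succ l ih =>
    rw [List.range_succ, List.filter_append, ih]
    by_cases h : l < kk
    · have h1 : min kk (l + 1) = l + 1 := by omega
      have h2 : min kk l = l := by omega
      rw [h1, h2, List.range_succ]
      simp [h]
    · have h1 : min kk (l + 1) = kk := by omega
      have h2 : min kk l = kk := by omega
      rw [h1, h2]
      simp [h]

lemma pvSumFilterStream (nums : List Int) (i m : Nat) (hv : 1 ≤ pvV nums i) (S : Int) :
    (((pvStream nums i m).map Prod.fst).filter (fun x => decide (x ≤ S))).sum
      = pvV nums i * (min (m : Int) (max 0 (pvK S (pvV nums i))) * min (m : Int) (max 0 (pvK S (pvV nums i)))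
          + 2 * min (m : Int) (max 0 (pvK S (pvV nums i)))) := by
  rw [pvStream, List.map_map]
  have hfst : ((Prod.fst ∘ fun j : Nat => ((2 * (j : Int) + 3) * pvV nums i, (i : Int))))
      = fun j : Nat => (2 * (j : Int) + 3) * pvV nums i := rfl
  rw [hfst, List.filter_map]
  have hp : ((fun x => decide (x ≤ S)) ∘ fun j : Nat => (2 * (j : Int) + 3) * pvV nums i)
      = fun j : Nat => decide (j < (pvK S (pvV nums i)).toNat) := by
    funext j
    simp only [Function.comp_apply]
    rw [decide_eq_decide]
    rw [pvK_iff S (pvV nums i) hv (j : Int)]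
    omega
  rw [hp, pvFilterRangeLt, pvGauss]
  have hcast : ((min (pvK S (pvV nums i)).toNat m : Nat) : Int)
      = min (m : Int) (max 0 (pvK S (pvV nums i))) := by
    push_cast
    omega
  rw [hcast]
  ring

lemma pvSumFilterFlat (l : List Nat) (f : Nat → List Int) (p : Int → Bool) :
    ((l.flatMap f).filter p).sum = (l.map (fun i => ((f i).filter p).sum)).sum := by
  induction l with
  | nil => simp
  | cons x xs ih => simp [List.flatMap_cons, List.filter_append, ih]

lemma pvSumFilterCosts (nums : List Int) (m : Nat) (hpos : ∀ x ∈ nums, 1 ≤ x) (S : Int) :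
    (((pvSorted nums m).map Prod.fst).filter (fun x => decide (x ≤ S))).sum
      = ∑ i ∈ Finset.range nums.length, pvV nums i
          * (min (m : Int) (max 0 (pvK S (pvV nums i))) * min (m : Int) (max 0 (pvK S (pvV nums i)))
             + 2 * min (m : Int) (max 0 (pvK S (pvV nums i)))) := by
  have hperm : (((pvSorted nums m).map Prod.fst).filter (fun x => decide (x ≤ S))).Perm
      (((pvCand nums m).map Prod.fst).filter (fun x => decide (x ≤ S))) :=
    ((pvSorted_perm nums m).map Prod.fst).filter _
  rw [hperm.sum_eq, pvCand, List.map_flatMap, pvSumFilterFlat, pvFinsetSumList]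
  apply Finset.sum_congr rfl
  intro i hi
  exact pvSumFilterStream nums i m (hpos _ (pvV_mem (Finset.mem_range.mp hi))) S

lemma pvSumTakeConst (L : List Int) : ∀ (mm : Nat) (lo : Int), L.Pairwise (· ≤ ·) →
    (∀ y ∈ L, lo < y) → mm ≤ L.countP (fun x => decide (x ≤ lo + 1)) →
    (L.take mm).sum = (mm : Int) * (lo + 1) := by
  induction L with
  | nil =>
    intro mm lo _ _ hcnt
    simp only [List.countP_nil, Nat.le_zero] at hcnt
    simp [hcnt]
  | cons x L ih =>
    intro mm lo hpw hgt hcnt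
    cases mm with
    | zero => simp
    | succ mm' =>
      have hxle : x ≤ lo + 1 := by
        by_contra hx
        push_neg at hx
        have hzero : List.countP (fun x => decide (x ≤ lo + 1)) (x :: L) = 0 := by
          rw [List.countP_eq_zero]
          intro y hy
          rcases List.mem_cons.mp hy with rfl | hy
          · simp; omega
          · have := (List.pairwise_cons.mp hpw).1 y hy
            simp; omega
        omega
      have hxeq : x = lo + 1 := le_antisymm hxle (by have := hgt x List.mem_cons_self; omega)
      rw [List.take_succ_cons, List.sum_cons]
      have hcnt' : mm' ≤ List.countP (fun x => decide (x ≤ lo + 1)) L := by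
        rw [List.countP_cons] at hcnt
        simp [hxle] at hcnt
        omega
      rw [ih mm' lo (List.pairwise_cons.mp hpw).2
        (fun y hy => hgt y (List.mem_cons_of_mem _ hy)) hcnt', hxeq]
      push_cast
      ring

lemma pvSumTakeSorted (L : List Int) : ∀ (mm : Nat) (lo : Int), L.Pairwise (· ≤ ·) →
    L.countP (fun x => decide (x ≤ lo)) < mm → mm ≤ L.countP (fun x => decide (x ≤ lo + 1)) →
    (L.take mm).sum = (L.filter (fun x => decide (x ≤ lo))).sum
      + ((mm : Int) - (L.countP (fun x => decide (x ≤ lo)) : Int)) * (lo + 1) := by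
  induction L with
  | nil =>
    intro mm lo _ h1 h2
    simp only [List.countP_nil] at h1 h2
    omega
  | cons x L ih =>
    intro mm lo hpw h1 h2
    by_cases hx : x ≤ lo
    · cases mm with
      | zero => exact absurd h1 (Nat.not_lt_zero _)
      | succ mm' =>
        have hd : decide (x ≤ lo) = true := decide_eq_true hx
        have h1' : List.countP (fun x => decide (x ≤ lo)) L < mm' := by
          rw [List.countP_cons] at h1
          simp [hx] at h1
          omega
        have h2' : mm' ≤ List.countP (fun x => decide (x ≤ lo + 1)) L := by
          rw [List.countP_cons] at h2
          simp [show x ≤ lo + 1 by omega] at h2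
          omega
        rw [List.take_succ_cons, List.sum_cons,
          ih mm' lo (List.pairwise_cons.mp hpw).2 h1' h2']
        simp only [List.filter_cons, List.countP_cons, hd, if_true, cond_true]
        simp [hx]
        push_cast
        ring
    · have hgt : ∀ y ∈ x :: L, lo < y := by
        intro y hy
        rcases List.mem_cons.mp hy with rfl | hy
        · omega
        · have := (List.pairwise_cons.mp hpw).1 y hy
          omega
      have hzero : List.countP (fun x => decide (x ≤ lo)) (x :: L) = 0 := by
        rw [List.countP_eq_zero]
        intro y hy
        have := hgt y hy
        simp
        omega
      have hfil : (x :: L).filter (fun x => decide (x ≤ lo)) = [] := by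
        rw [List.filter_eq_nil_iff]
        intro y hy
        have := hgt y hy
        simp
        omega
      rw [hzero, hfil, pvSumTakeConst (x :: L) mm lo hpw hgt h2]
      simp

-- ---- the binary search ----

lemma pvBsearch_spec (nums : List Int) (m : Int) :
    ∀ (N : Nat) (lo hi : Int), (hi - lo).toNat ≤ N → lo < hi →
      pvCnt nums lo < m → m ≤ pvCnt nums hi →
      (pvBsearch nums m lo hi).2 = (pvBsearch nums m lo hi).1 + 1 ∧
        pvCnt nums (pvBsearch nums m lo hi).1 < m ∧
        m ≤ pvCnt nums (pvBsearch nums m lo hi).2 := by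
  intro N
  induction N with
  | zero =>
    intro lo hi hN hlt _ _
    omega
  | succ N ih =>
    intro lo hi hN hlt h1 h2
    rw [pvBsearch]
    by_cases h : hi - lo > 1
    · rw [dif_pos h]
      have hm1 : lo < PySem.Int.floordiv (lo + hi) 2 := by
        rw [pvFloordiv_pos _ _ (by norm_num : (0 : Int) < 2)]; omega
      have hm2 : PySem.Int.floordiv (lo + hi) 2 < hi := by
        rw [pvFloordiv_pos _ _ (by norm_num : (0 : Int) < 2)]; omega
      by_cases hc : pvCnt nums (PySem.Int.floordiv (lo + hi) 2) ≥ m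
      · rw [if_pos hc]
        exact ih lo _ (by omega) hm1 h1 hc
      · rw [if_neg hc]
        push_neg at hc
        exact ih _ hi (by omega) hm2 hc h2
    · rw [dif_neg h]
      refine ⟨?_, ?_, ?_⟩
      · show hi = lo + 1
        omega
      · exact h1
      · exact h2

-- ---- the main equality ----

lemma pvMain (nums : List Int) : treeDegreeOptimization nums = treeDegreeOptimization_alt nums := by
  by_cases hn3 : nums.length ≤ 2
  · -- no iterations: both sides are the plain sum
    have hA : treeDegreeOptimization nums = nums.sum := by
      simp only [treeDegreeOptimization]
      rw [show nums.length - 2 = 0 by omega, pvLoopA]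
      exact pvRes_replicate nums
    have hB : treeDegreeOptimization_alt nums = nums.sum := by
      simp only [treeDegreeOptimization_alt]
      rw [if_pos (show (nums.length : Int) - 2 ≤ 0 by push_cast; omega)]
    rw [hA, hB]
  · push_neg at hn3
    have hne : nums ≠ [] := by
      intro h
      rw [h] at hn3
      simp at hn3
    obtain ⟨mn, hmn⟩ : ∃ mn, PySem.List.min? nums (fun x => x) = some mn := by
      cases h : PySem.List.min? nums (fun x => x) with
      | none => exact absurd ((PySem.List.min?_eq_none_iff nums (fun x => x)).mp h) hne
      | some mn => exact ⟨mn, rfl⟩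
    have hmem : mn ∈ nums := PySem.List.min?_mem hmn
    have hismin : ∀ y ∈ nums, mn ≤ y := by
      have := PySem.List.min?_isMin hmn
      simpa using this
    have hmlt : ¬ ((nums.length : Int) - 2 ≤ 0) := by push_cast; omega
    by_cases hneg : mn ≤ 0
    · -- all extra degrees go to the first minimum node
      obtain ⟨i0, hi0, hv0, hfirst⟩ := pvFirstMin nums mn hmem
      have hdeg0 : List.replicate nums.length (1 : Int)
          = (List.range nums.length).map (fun j => if j = i0 then 1 + ((0 : Nat) : Int) else 1) := by
        apply List.ext_getElem
        · simp
        · intro j h1 h2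
          simp only [List.getElem_replicate, List.getElem_map, List.getElem_range]
          split_ifs <;> norm_num
      have hpq0 : ((PySem.List.enumerate nums 0).map (fun p => (3 * p.2, p.1))).Perm
          (((2 * ((0 : Nat) : Int) + 3) * mn, (i0 : Int)) :: pvOthers nums i0) := by
        rw [pvInitPq]
        have hperm : (List.range nums.length).Perm (i0 :: (List.range nums.length).erase i0) :=
          List.perm_cons_erase (List.mem_range.mpr hi0)
        refine (hperm.map (fun i => (3 * pvV nums i, (i : Int)))).trans ?_
        rw [List.map_cons, (List.nodup_range).erase_eq_filter i0]
        have hhead : ((3 * pvV nums i0, (i0 : Int)) : Int × Int)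
            = ((2 * ((0 : Nat) : Int) + 3) * mn, (i0 : Int)) := by
          rw [hv0]; norm_num
        rw [hhead]
        rfl
      have hA : treeDegreeOptimization nums
          = nums.sum + ((1 + ((0 + (nums.length - 2) : Nat) : Int))
              * (1 + ((0 + (nums.length - 2) : Nat) : Int)) - 1) * mn := by
        simp only [treeDegreeOptimization]
        rw [hdeg0, pvLoopA_neg nums mn i0 hneg hismin hi0 hv0 hfirst (nums.length - 2) 0 _ hpq0]
        have := pvRes_neg nums i0 hi0 (1 + ((0 + (nums.length - 2) : Nat) : Int))
        rw [hv0] at this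
        exact this
      have hB : treeDegreeOptimization_alt nums
          = nums.sum + mn * (((nums.length : Int) - 2) * ((nums.length : Int) - 2)
              + 2 * ((nums.length : Int) - 2)) := by
        simp only [treeDegreeOptimization_alt, hmn]
        rw [if_neg hmlt, if_pos hneg]
      rw [hA, hB]
      rw [show ((0 + (nums.length - 2) : Nat) : Int) = (nums.length : Int) - 2 by
        push_cast [Nat.cast_sub (show 2 ≤ nums.length by omega)]; ring]
      ring
    · -- all values positive: threshold characterisation
      push_neg at hneg
      have hpos : ∀ x ∈ nums, 1 ≤ x := fun x hx => by have := hismin x hx; omega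
      have hmn1 : 1 ≤ mn := by omega
      have hcast : ((nums.length - 2 : Nat) : Int) = (nums.length : Int) - 2 := by
        push_cast [Nat.cast_sub (show 2 ≤ nums.length by omega)]; ring
      -- A-side: the greedy sum is the sum of the n-2 cheapest candidates
      have hpq0eq : (PySem.List.enumerate nums 0).map (fun p => (3 * p.2, p.1))
          = pvFronts nums (fun _ => 0) := by
        rw [pvInitPq, pvFronts]
        apply List.map_congr_left
        intro i _
        norm_num
      have hA : treeDegreeOptimization nums
          = nums.sum + pvCost (((pvSorted nums (nums.length - 2)).take (nums.length - 2)
              : List (Int × Int)) : Multiset (Int × Int)) := by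
        simp only [treeDegreeOptimization]
        rw [hpq0eq]
        have hdeg0 : List.replicate nums.length (1 : Int)
            = (List.range nums.length).map (fun i => 1 + (((fun _ : Nat => (0 : Nat)) i) : Int)) := by
          apply List.ext_getElem
          · simp
          · intro j h1 h2
            simp only [List.getElem_replicate, List.getElem_map, List.getElem_range]
            norm_num
        rw [hdeg0]
        exact pvLoopA_pos nums hpos (nums.length - 2) (by omega) rfl (nums.length - 2)
          (fun _ => 0) 0 (pvFronts nums (fun _ => 0)) (by omega) (by simp) rfl
          (by simp [pvPref, pvStream])
      -- B-side: unfold and name the binary-search result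
      have hB : treeDegreeOptimization_alt nums
          = nums.sum
            + (nums.foldl (fun (q : Int × Int) v =>
                let k0 := PySem.Int.floordiv (PySem.Int.floordiv
                  (pvBsearch nums ((nums.length : Int) - 2) 0
                    ((2 * ((nums.length : Int) - 2) + 1) * mn)).1 v - 1) 2
                let k := if k0 < 0 then 0 else k0
                (q.1 + k, q.2 + v * (k * k + 2 * k))) (0, 0)).2
            + (((nums.length : Int) - 2)
               - (nums.foldl (fun (q : Int × Int) v =>
                let k0 := PySem.Int.floordiv (PySem.Int.floordiv
                  (pvBsearch nums ((nums.length : Int) - 2) 0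
                    ((2 * ((nums.length : Int) - 2) + 1) * mn)).1 v - 1) 2
                let k := if k0 < 0 then 0 else k0
                (q.1 + k, q.2 + v * (k * k + 2 * k))) (0, 0)).1)
              * (pvBsearch nums ((nums.length : Int) - 2) 0
                  ((2 * ((nums.length : Int) - 2) + 1) * mn)).2 := by
        simp only [treeDegreeOptimization_alt, hmn]
        rw [if_neg hmlt, if_neg (by omega)]
      -- binary-search preconditions
      have hmI1 : (1 : Int) ≤ (nums.length : Int) - 2 := by push_cast; omega
      have h0 : pvCnt nums 0 < (nums.length : Int) - 2 := by
        rw [pvCnt_eq]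
        have hz : ∀ i ∈ Finset.range nums.length, max 0 (pvK 0 (pvV nums i)) = 0 := by
          intro i hi
          have hv := hpos _ (pvV_mem (Finset.mem_range.mp hi))
          rw [pvK, pvFloordiv_pos _ _ (by omega : (0:Int) < pvV nums i),
            pvFloordiv_pos _ _ (by norm_num : (0:Int) < 2), Int.zero_ediv]
          decide
        rw [Finset.sum_congr rfl hz, Finset.sum_const_zero]
        omega
      have hup : (nums.length : Int) - 2 ≤ pvCnt nums ((2 * ((nums.length : Int) - 2) + 1) * mn) := by
        rw [pvCnt_eq]
        obtain ⟨iw, hiw, hvw, _⟩ := pvFirstMin nums mn hmem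
        have hterm : max 0 (pvK ((2 * ((nums.length : Int) - 2) + 1) * mn) (pvV nums iw))
            = (nums.length : Int) - 2 := by
          rw [hvw, pvK, pvFloordiv_pos _ _ (by omega : (0:Int) < mn),
            pvFloordiv_pos _ _ (by norm_num : (0:Int) < 2),
            Int.mul_ediv_cancel _ (by omega : mn ≠ 0)]
          omega
        calc (nums.length : Int) - 2
            = max 0 (pvK ((2 * ((nums.length : Int) - 2) + 1) * mn) (pvV nums iw)) := hterm.symm
          _ ≤ _ := Finset.single_le_sum
              (f := fun i => max 0 (pvK ((2 * ((nums.length : Int) - 2) + 1) * mn) (pvV nums i)))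
              (fun i _ => le_max_left _ _) (Finset.mem_range.mpr hiw)
      have hlt0 : (0 : Int) < (2 * ((nums.length : Int) - 2) + 1) * mn := by nlinarith
      obtain ⟨hT, hclo, hchi⟩ := pvBsearch_spec nums ((nums.length : Int) - 2)
        ((2 * ((nums.length : Int) - 2) + 1) * mn - 0).toNat 0
        ((2 * ((nums.length : Int) - 2) + 1) * mn) (by omega) hlt0 h0 hup
      -- each node takes fewer than m increments at or below lo
      have hterm_le : ∀ i ∈ Finset.range nums.length,
          max 0 (pvK (pvBsearch nums ((nums.length : Int) - 2) 0
            ((2 * ((nums.length : Int) - 2) + 1) * mn)).1 (pvV nums i))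
          ≤ pvCnt nums (pvBsearch nums ((nums.length : Int) - 2) 0
            ((2 * ((nums.length : Int) - 2) + 1) * mn)).1 := by
        intro i hi
        rw [pvCnt_eq]
        exact Finset.single_le_sum
          (f := fun i => max 0 (pvK (pvBsearch nums ((nums.length : Int) - 2) 0
            ((2 * ((nums.length : Int) - 2) + 1) * mn)).1 (pvV nums i)))
          (fun _ _ => le_max_left _ _) hi
      have hmincap : ∀ i ∈ Finset.range nums.length,
          min (((nums.length - 2 : Nat)) : Int)
            (max 0 (pvK (pvBsearch nums ((nums.length : Int) - 2) 0
              ((2 * ((nums.length : Int) - 2) + 1) * mn)).1 (pvV nums i)))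
          = max 0 (pvK (pvBsearch nums ((nums.length : Int) - 2) 0
              ((2 * ((nums.length : Int) - 2) + 1) * mn)).1 (pvV nums i)) := by
        intro i hi
        have h1 := hterm_le i hi
        rw [hcast]
        omega
      -- the count of candidates at or below lo equals pvCnt lo
      have hcntlo : ((List.countP (fun e => decide (e.1 ≤ (pvBsearch nums ((nums.length : Int) - 2) 0
            ((2 * ((nums.length : Int) - 2) + 1) * mn)).1)) (pvCand nums (nums.length - 2)) : Nat) : Int)
          = pvCnt nums (pvBsearch nums ((nums.length : Int) - 2) 0
              ((2 * ((nums.length : Int) - 2) + 1) * mn)).1 := by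
        rw [pvCountP_cand nums (nums.length - 2) hpos, pvCnt_eq]
        exact Finset.sum_congr rfl hmincap
      -- the count at or below T is at least m
      have hcntT : ((nums.length : Int) - 2)
          ≤ ((List.countP (fun e => decide (e.1 ≤ (pvBsearch nums ((nums.length : Int) - 2) 0
              ((2 * ((nums.length : Int) - 2) + 1) * mn)).2)) (pvCand nums (nums.length - 2)) : Nat) : Int) := by
        rw [pvCountP_cand nums (nums.length - 2) hpos]
        by_cases hex : ∃ i ∈ Finset.range nums.length,
            ((nums.length : Int) - 2) ≤ max 0 (pvK (pvBsearch nums ((nums.length : Int) - 2) 0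
              ((2 * ((nums.length : Int) - 2) + 1) * mn)).2 (pvV nums i))
        · obtain ⟨i, hi, hgei⟩ := hex
          calc ((nums.length : Int) - 2)
              = min (((nums.length - 2 : Nat)) : Int)
                  (max 0 (pvK (pvBsearch nums ((nums.length : Int) - 2) 0
                    ((2 * ((nums.length : Int) - 2) + 1) * mn)).2 (pvV nums i))) := by
                rw [hcast]; omega
            _ ≤ _ := Finset.single_le_sum
                (f := fun i => min (((nums.length - 2 : Nat)) : Int)
                  (max 0 (pvK (pvBsearch nums ((nums.length : Int) - 2) 0
                    ((2 * ((nums.length : Int) - 2) + 1) * mn)).2 (pvV nums i))))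
                (fun i _ => le_min (Int.natCast_nonneg _) (le_max_left _ _)) hi
        · push_neg at hex
          have : ∀ i ∈ Finset.range nums.length,
              min (((nums.length - 2 : Nat)) : Int)
                (max 0 (pvK (pvBsearch nums ((nums.length : Int) - 2) 0
                  ((2 * ((nums.length : Int) - 2) + 1) * mn)).2 (pvV nums i)))
              = max 0 (pvK (pvBsearch nums ((nums.length : Int) - 2) 0
                  ((2 * ((nums.length : Int) - 2) + 1) * mn)).2 (pvV nums i)) := by
            intro i hi
            have := hex i hi
            rw [hcast]
            omega
          rw [Finset.sum_congr rfl this, ← pvCnt_eq]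
          exact hchi
      -- the threshold decomposition of the m cheapest costs
      have hLpw := pvCosts_pairwise nums (nums.length - 2)
      have hc1 : List.countP (fun x => decide (x ≤ (pvBsearch nums ((nums.length : Int) - 2) 0
            ((2 * ((nums.length : Int) - 2) + 1) * mn)).1))
            ((pvSorted nums (nums.length - 2)).map Prod.fst) < nums.length - 2 := by
        have := hcntlo
        rw [pvCountP_costs]
        have h2 := hclo
        omega
      have hc2 : nums.length - 2 ≤ List.countP (fun x => decide (x ≤ (pvBsearch nums ((nums.length : Int) - 2) 0
            ((2 * ((nums.length : Int) - 2) + 1) * mn)).1 + 1))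
            ((pvSorted nums (nums.length - 2)).map Prod.fst) := by
        rw [pvCountP_costs,
          show (pvBsearch nums ((nums.length : Int) - 2) 0
            ((2 * ((nums.length : Int) - 2) + 1) * mn)).1 + 1
          = (pvBsearch nums ((nums.length : Int) - 2) 0
            ((2 * ((nums.length : Int) - 2) + 1) * mn)).2 from hT.symm]
        have := hcntT
        omega
      have hsum := pvSumTakeSorted ((pvSorted nums (nums.length - 2)).map Prod.fst)
        (nums.length - 2)
        (pvBsearch nums ((nums.length : Int) - 2) 0
          ((2 * ((nums.length : Int) - 2) + 1) * mn)).1 hLpw hc1 hc2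
      have hAc : pvCost (((pvSorted nums (nums.length - 2)).take (nums.length - 2)
            : List (Int × Int)) : Multiset (Int × Int))
          = (((pvSorted nums (nums.length - 2)).map Prod.fst).take (nums.length - 2)).sum := by
        rw [pvCost_coe, List.map_take]
      have hfil := pvSumFilterCosts nums (nums.length - 2) hpos
        (pvBsearch nums ((nums.length : Int) - 2) 0
          ((2 * ((nums.length : Int) - 2) + 1) * mn)).1
      have hfil' : (((pvSorted nums (nums.length - 2)).map Prod.fst).filter
            (fun x => decide (x ≤ (pvBsearch nums ((nums.length : Int) - 2) 0
              ((2 * ((nums.length : Int) - 2) + 1) * mn)).1))).sum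
          = ∑ i ∈ Finset.range nums.length, pvV nums i
              * (max 0 (pvK (pvBsearch nums ((nums.length : Int) - 2) 0
                  ((2 * ((nums.length : Int) - 2) + 1) * mn)).1 (pvV nums i))
                * max 0 (pvK (pvBsearch nums ((nums.length : Int) - 2) 0
                  ((2 * ((nums.length : Int) - 2) + 1) * mn)).1 (pvV nums i))
                + 2 * max 0 (pvK (pvBsearch nums ((nums.length : Int) - 2) 0
                  ((2 * ((nums.length : Int) - 2) + 1) * mn)).1 (pvV nums i))) := by
        rw [hfil]
        apply Finset.sum_congr rfl
        intro i hi
        rw [hmincap i hi]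
      have hx1 : ((List.countP (fun x => decide (x ≤ (pvBsearch nums ((nums.length : Int) - 2) 0
            ((2 * ((nums.length : Int) - 2) + 1) * mn)).1))
            ((pvSorted nums (nums.length - 2)).map Prod.fst) : Nat) : Int)
          = ∑ i ∈ Finset.range nums.length,
              max 0 (pvK (pvBsearch nums ((nums.length : Int) - 2) 0
                ((2 * ((nums.length : Int) - 2) + 1) * mn)).1 (pvV nums i)) := by
        rw [pvCountP_costs, hcntlo, pvCnt_eq]
      rw [hA, hB, hAc, hsum, hfil', pvTe_eq]
      dsimp only
      rw [hx1, hcast, hT]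
      ring


-- ===== VERDICT (by name: the statement is the Claim_ definition above) =====
theorem treeDegreeOptimization_spec : Claim_equal_treeDegreeOptimization := by
  intro nums _
  exact pvMain nums
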